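-- pv_equiv track=rewrite | github.com/ChFlick/AdventOfCode | 2017/24/electromagneticMoat2.py | maxBridgeConnections
-- ===== SOURCE A (Python) =====
-- from functools import reduce
--
-- def maxBridgeConnections(currentComponents, freeElement, bridges):
--     fittingBridges = [x for x in bridges if x.count(freeElement) > 0]
--     if len(fittingBridges) == 0:
--         return (len(currentComponents), calcVal(currentComponents))
--
--     maxVals = [0, 0]
--     for bridge in fittingBridges:
--         index = bridges.index(bridge)
--         bridgesWithoutCurrent = bridges[:index] + bridges[index + 1:]
--         nextLen, nextVal = maxBridgeConnections(currentComponents + [bridge], bridge[1] if bridge[0] == freeElement else bridge[0], bridgesWithoutCurrent)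
--         if nextLen > maxVals[0]:
--             maxVals[0] = nextLen
--             maxVals[1] = nextVal
--         elif nextLen == maxVals[0]:
--             maxVals[1] = max(maxVals[1], nextVal)
--
--     return maxVals
--
-- def calcVal(bridges):
--     return reduce(lambda x,y: x + sum(y), bridges, 0)
-- ===== SOURCE B (Python) =====
-- # B: different decomposition — a helper computes the best (length, value) EXTENSION
-- # relative to the free port, without threading the current chain through the
-- # recursion; the wrapper adds the current chain's length/value once at the end.
-- # Mirrors A's tuple (base case) / list (recursive case) return-type quirk.
--
-- def maxBridgeConnections(currentComponents, freeElement, bridges):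
--     if not any(freeElement in bridge for bridge in bridges):
--         return (len(currentComponents), _total(currentComponents))
--     dLen, dVal = _best(freeElement, bridges)
--     return [len(currentComponents) + dLen, _total(currentComponents) + dVal]
--
-- def _total(components):
--     return sum(a + b for a, b in components)
--
-- def _best(freeElement, bridges):
--     best = (0, 0)
--     for bridge in bridges:
--         if freeElement in bridge:
--             a, b = bridge
--             j = bridges.index(bridge)
--             s = _best(b if a == freeElement else a, bridges[:j] + bridges[j + 1:])
--             best = max(best, (1 + s[0], a + b + s[1]))
--     return best
-- ===== Notes on version B (the rewrite author's own statement) =====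
-- stated objective: alternative
-- what changed: B replaces A's recursion that threads the whole current chain and keeps a mutable [len,val] accumulator by a helper that computes the best (length,value) extension relative to the free port alone (tuple max), with the chain's own length/value added once by a wrapper.
import Mathlib
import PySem

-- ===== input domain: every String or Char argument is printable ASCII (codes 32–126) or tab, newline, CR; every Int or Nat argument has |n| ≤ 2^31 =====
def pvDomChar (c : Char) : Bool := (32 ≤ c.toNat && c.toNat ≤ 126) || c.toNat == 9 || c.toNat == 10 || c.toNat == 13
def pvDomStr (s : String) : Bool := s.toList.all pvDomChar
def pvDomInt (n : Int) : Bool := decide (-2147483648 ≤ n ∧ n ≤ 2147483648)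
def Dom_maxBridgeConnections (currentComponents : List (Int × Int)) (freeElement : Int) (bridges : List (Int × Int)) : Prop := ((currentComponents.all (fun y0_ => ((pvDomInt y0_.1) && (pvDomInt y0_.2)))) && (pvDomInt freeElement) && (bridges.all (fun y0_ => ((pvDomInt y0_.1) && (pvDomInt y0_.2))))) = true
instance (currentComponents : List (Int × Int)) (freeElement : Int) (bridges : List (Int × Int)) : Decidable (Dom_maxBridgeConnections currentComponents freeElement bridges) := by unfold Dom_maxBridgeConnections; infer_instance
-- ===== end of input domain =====

-- B recomputes the best chain extension relative to the free port only (no chain threading);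
-- Lean-level return values (Int × Int) agree everywhere; Python A returns a tuple in the base
-- case and a list otherwise, and Python B mirrors that.

-- A-side helper: `index = bridges.index(bridge); bridges[:index] + bridges[index + 1:]`
def removeFirst (bridges : List (Int × Int)) (bridge : Int × Int) : List (Int × Int) :=
  PySem.List.slice bridges none (some (((PySem.List.index? bridges bridge).getD 0 : Nat) : Int)) ++
    PySem.List.slice bridges (some ((((PySem.List.index? bridges bridge).getD 0 : Nat) : Int) + 1)) none

-- needed by the ports' termination proofs
theorem removeFirst_eq_eraseIdx (bridges : List (Int × Int)) (bridge : Int × Int)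
    (_h : bridge ∈ bridges) :
    removeFirst bridges bridge = bridges.eraseIdx ((PySem.List.index? bridges bridge).getD 0) := by
  unfold removeFirst
  have : ((PySem.List.index? bridges bridge).getD 0 : Int) + 1 = (((PySem.List.index? bridges bridge).getD 0 + 1 : Nat) : Int) := by push_cast; ring
  rw [this, PySem.List.slice_to_natCast, PySem.List.slice_from_natCast,
    List.eraseIdx_eq_take_drop_succ]

theorem removeFirst_length_lt (bridges : List (Int × Int)) (bridge : Int × Int)
    (h : bridge ∈ bridges) :
    (removeFirst bridges bridge).length < bridges.length := by
  rw [removeFirst_eq_eraseIdx bridges bridge h]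
  obtain ⟨k, hk⟩ := Option.isSome_iff_exists.mp ((PySem.List.index?_isSome_iff bridges bridge).mpr h)
  obtain ⟨pre, suf, hxs, hlen, -⟩ := (PySem.List.index?_eq_some_iff bridges bridge k).mp hk
  have hklt : k < bridges.length := by subst hxs; simp [← hlen]
  rw [hk]
  simp only [Option.getD_some]
  rw [List.length_eraseIdx_of_lt hklt]
  omega

-- ===== PORT A =====
def calcVal (bridges : List (Int × Int)) : Int :=
  -- reduce(lambda x,y: x + sum(y), bridges, 0)
  bridges.foldl (fun x y => x + (y.1 + y.2)) 0

def maxBridgeConnections (currentComponents : List (Int × Int)) (freeElement : Int) (bridges : List (Int × Int)) : Int × Int :=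
  -- x.count(freeElement) > 0 on a 2-tuple ↔ one of the slots equals freeElement
  let fittingBridges := bridges.filter (fun x => x.1 == freeElement || x.2 == freeElement)
  if fittingBridges.length = 0 then
    ((currentComponents.length : Int), calcVal currentComponents)
  else
    fittingBridges.attach.foldl (fun maxVals b =>
      let bridge := b.1
      let bridgesWithoutCurrent := removeFirst bridges bridge
      let next := maxBridgeConnections (currentComponents ++ [bridge])
        (if bridge.1 = freeElement then bridge.2 else bridge.1) bridgesWithoutCurrent
      if next.1 > maxVals.1 then (next.1, next.2)
      else if next.1 = maxVals.1 then (maxVals.1, max maxVals.2 next.2)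
      else maxVals) ((0 : Int), (0 : Int))
termination_by bridges.length
decreasing_by
  have hb := b.2
  simp only [fittingBridges, List.mem_unattach] at hb
  obtain ⟨hm, -⟩ := hb
  exact removeFirst_length_lt bridges b.1 hm

-- ===== PORT B =====
-- Python's builtin max on a pair of 2-tuples of ints (lexicographic, first arg on tie)
def pyMax2 (x y : Int × Int) : Int × Int :=
  if x.1 < y.1 ∨ (x.1 = y.1 ∧ x.2 < y.2) then y else x

def totalB (components : List (Int × Int)) : Int :=
  -- sum(a + b for a, b in components)
  (components.map (fun y => y.1 + y.2)).sum

-- needed by bestExt's termination proof: removing the first occurrence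
-- (`j = bridges.index(bridge); bridges[:j] + bridges[j+1:]`) shortens the list
theorem bRemove_length_lt (bridges : List (Int × Int)) (bridge : Int × Int)
    (h : bridge ∈ bridges) :
    (PySem.List.slice bridges none (some (((PySem.List.index? bridges bridge).getD 0 : Nat) : Int)) ++
      PySem.List.slice bridges (some ((((PySem.List.index? bridges bridge).getD 0 : Nat) : Int) + 1)) none).length
      < bridges.length := by
  obtain ⟨k, hk⟩ := Option.isSome_iff_exists.mp ((PySem.List.index?_isSome_iff bridges bridge).mpr h)
  obtain ⟨pre, suf, hxs, hlen, -⟩ := (PySem.List.index?_eq_some_iff bridges bridge k).mp hk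
  have hklt : k < bridges.length := by subst hxs; simp [← hlen]
  rw [hk]
  simp only [Option.getD_some]
  have hcast : ((k : Nat) : Int) + 1 = (((k + 1 : Nat) : Nat) : Int) := by push_cast; ring
  rw [hcast, PySem.List.slice_to_natCast, PySem.List.slice_from_natCast]
  simp only [List.length_append, List.length_take, List.length_drop]
  omega

def bestExt (freeElement : Int) (bridges : List (Int × Int)) : Int × Int :=
  bridges.attach.foldl (fun best b =>
    if b.1.1 == freeElement || b.1.2 == freeElement then
      -- j = bridges.index(bridge); rest = bridges[:j] + bridges[j+1:]
      let s := bestExt (if b.1.1 = freeElement then b.1.2 else b.1.1)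
        (PySem.List.slice bridges none (some (((PySem.List.index? bridges b.1).getD 0 : Nat) : Int)) ++
          PySem.List.slice bridges (some ((((PySem.List.index? bridges b.1).getD 0 : Nat) : Int) + 1)) none)
      pyMax2 best (1 + s.1, b.1.1 + b.1.2 + s.2)
    else best) ((0 : Int), (0 : Int))
termination_by bridges.length
decreasing_by
  exact bRemove_length_lt bridges b.1 b.2

def maxBridgeConnections_alt (currentComponents : List (Int × Int)) (freeElement : Int) (bridges : List (Int × Int)) : Int × Int :=
  if (bridges.any (fun bridge => bridge.1 == freeElement || bridge.2 == freeElement)) = false then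
    ((currentComponents.length : Int), totalB currentComponents)
  else
    let d := bestExt freeElement bridges
    ((currentComponents.length : Int) + d.1, totalB currentComponents + d.2)

-- ===== PRECONDITION & SPEC =====
def Spec_maxBridgeConnections (currentComponents : List (Int × Int)) (freeElement : Int) (bridges : List (Int × Int)) (out : Int × Int) : Prop := out = maxBridgeConnections_alt currentComponents freeElement bridges
instance (currentComponents : List (Int × Int)) (freeElement : Int) (bridges : List (Int × Int)) (out : Int × Int) : Decidable (Spec_maxBridgeConnections currentComponents freeElement bridges out) := by unfold Spec_maxBridgeConnections; infer_instance

-- ===== CLAIM (what is proved, stated in full; the proofs are below) =====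
def Claim_equal_maxBridgeConnections : Prop := ∀ (currentComponents : List (Int × Int)) (freeElement : Int) (bridges : List (Int × Int)), Dom_maxBridgeConnections currentComponents freeElement bridges → Spec_maxBridgeConnections currentComponents freeElement bridges (maxBridgeConnections currentComponents freeElement bridges)

-- ===== LEMMAS AND PROOFS =====

theorem calcVal_go (l : List (Int × Int)) : ∀ (a : Int),
    l.foldl (fun x y => x + (y.1 + y.2)) a = a + (l.map (fun y => y.1 + y.2)).sum := by
  induction l with
  | nil => intro a; simp
  | cons h t ih => intro a; simp only [List.foldl_cons, List.map_cons, List.sum_cons, ih]; ring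

theorem calcVal_eq_totalB (l : List (Int × Int)) : calcVal l = totalB l := by
  unfold calcVal totalB; rw [calcVal_go]; ring

theorem calcVal_append (cc : List (Int × Int)) (b : Int × Int) :
    calcVal (cc ++ [b]) = calcVal cc + (b.1 + b.2) := by
  unfold calcVal; rw [List.foldl_append]; rfl

theorem pyMax2_fst_le (a y : Int × Int) : a.1 ≤ (pyMax2 a y).1 := by
  unfold pyMax2; split_ifs with h
  · omega
  · exact le_rfl

theorem pyMax2_zero (v : Int × Int) (h : 0 < v.1) : pyMax2 (0, 0) v = v := by
  unfold pyMax2; rw [if_pos (Or.inl h)]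

theorem pyMax2_offset (c1 c2 : Int) (a y : Int × Int) :
    pyMax2 (c1 + a.1, c2 + a.2) (c1 + y.1, c2 + y.2)
      = (c1 + (pyMax2 a y).1, c2 + (pyMax2 a y).2) := by
  unfold pyMax2
  dsimp only
  split_ifs <;> first | rfl | (exfalso; omega)

theorem update_eq_pyMax2 (m n : Int × Int) :
    (if n.1 > m.1 then (n.1, n.2)
     else if n.1 = m.1 then (m.1, max m.2 n.2) else m) = pyMax2 m n := by
  unfold pyMax2
  by_cases h1 : n.1 > m.1
  · rw [if_pos h1, if_pos (Or.inl h1)]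
  · by_cases h2 : n.1 = m.1
    · rw [if_neg h1, if_pos h2]
      by_cases h3 : m.2 < n.2
      · rw [if_pos (Or.inr ⟨h2.symm, h3⟩), max_eq_right (le_of_lt h3), ← h2]
      · rw [if_neg (by rintro (h | ⟨-, h⟩); exacts [h1 h, h3 h]),
            max_eq_left (not_lt.mp h3)]
    · rw [if_neg h1, if_neg h2,
          if_neg (by rintro (h | ⟨h, -⟩); exacts [h1 h, h2 h.symm])]

theorem foldl_fst_mono {α : Type} (g : Int × Int → α → Int × Int)
    (hg : ∀ (a : Int × Int) (x : α), a.1 ≤ (g a x).1) :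
    ∀ (L : List α) (a : Int × Int), a.1 ≤ (L.foldl g a).1 := by
  intro L
  induction L with
  | nil => intro a; exact le_rfl
  | cons x t ih => intro a; exact le_trans (hg a x) (ih (g a x))

theorem bestExt_fst_nonneg (free : Int) (bridges : List (Int × Int)) :
    0 ≤ (bestExt free bridges).1 := by
  rw [bestExt]
  refine foldl_fst_mono _ ?_ _ ((0 : Int), (0 : Int))
  intro a x
  dsimp only
  split
  · exact pyMax2_fst_le a _
  · exact le_rfl

theorem bestExt_eq (free : Int) (bridges : List (Int × Int)) :
    bestExt free bridges
      = (bridges.filter (fun x => x.1 == free || x.2 == free)).foldl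
          (fun best b =>
            pyMax2 best
              (1 + (bestExt (if b.1 = free then b.2 else b.1) (removeFirst bridges b)).1,
               b.1 + b.2 + (bestExt (if b.1 = free then b.2 else b.1) (removeFirst bridges b)).2))
          ((0 : Int), (0 : Int)) := by
  rw [bestExt, List.foldl_filter]
  exact List.foldl_attach (l := bridges)
    (f := fun x y =>
      if (y.1 == free || y.2 == free) = true then
        pyMax2 x
          (1 + (bestExt (if y.1 = free then y.2 else y.1) (removeFirst bridges y)).1,
           y.1 + y.2 + (bestExt (if y.1 = free then y.2 else y.1) (removeFirst bridges y)).2)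
      else x)
    (b := ((0 : Int), (0 : Int)))

theorem A_unfold (cc : List (Int × Int)) (free : Int) (bridges : List (Int × Int)) :
    maxBridgeConnections cc free bridges
      = (if (bridges.filter (fun x => x.1 == free || x.2 == free)).length = 0 then
          ((cc.length : Int), calcVal cc)
        else
          (bridges.filter (fun x => x.1 == free || x.2 == free)).foldl
            (fun maxVals b =>
              let next := maxBridgeConnections (cc ++ [b])
                (if b.1 = free then b.2 else b.1) (removeFirst bridges b)
              if next.1 > maxVals.1 then (next.1, next.2)
              else if next.1 = maxVals.1 then (maxVals.1, max maxVals.2 next.2)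
              else maxVals)
            ((0 : Int), (0 : Int))) := by
  rw [maxBridgeConnections]
  split_ifs with h
  · rfl
  · exact List.foldl_attach
      (l := bridges.filter (fun x => x.1 == free || x.2 == free))
      (f := fun maxVals b =>
        let next := maxBridgeConnections (cc ++ [b])
          (if b.1 = free then b.2 else b.1) (removeFirst bridges b)
        if next.1 > maxVals.1 then (next.1, next.2)
        else if next.1 = maxVals.1 then (maxVals.1, max maxVals.2 next.2)
        else maxVals)
      (b := ((0 : Int), (0 : Int)))

theorem foldl_pyMax2_offset {α : Type} (u : α → Int × Int) (c1 c2 : Int) :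
    ∀ (L : List α) (a : Int × Int),
      L.foldl (fun acc x => pyMax2 acc (c1 + (u x).1, c2 + (u x).2)) (c1 + a.1, c2 + a.2)
        = (c1 + (L.foldl (fun acc x => pyMax2 acc (u x)) a).1,
           c2 + (L.foldl (fun acc x => pyMax2 acc (u x)) a).2) := by
  intro L
  induction L with
  | nil => intro a; rfl
  | cons x t ih =>
    intro a
    simp only [List.foldl_cons]
    rw [pyMax2_offset]
    exact ih (pyMax2 a (u x))

theorem foldl_pyMax2_zero {α : Type} (L : List α) (g : Int × Int → α → Int × Int)
    (u : α → Int × Int) (c1 c2 : Int)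
    (hg : ∀ (acc : Int × Int), ∀ x ∈ L, g acc x = pyMax2 acc (c1 + (u x).1, c2 + (u x).2))
    (hu : ∀ x ∈ L, 1 ≤ (u x).1) (hc : 0 ≤ c1) (hne : L ≠ []) :
    L.foldl g ((0 : Int), (0 : Int))
      = (c1 + (L.foldl (fun acc x => pyMax2 acc (u x)) ((0 : Int), (0 : Int))).1,
         c2 + (L.foldl (fun acc x => pyMax2 acc (u x)) ((0 : Int), (0 : Int))).2) := by
  rw [PySem.List.foldl_congr_mem L g (fun acc x => pyMax2 acc (c1 + (u x).1, c2 + (u x).2))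
    ((0 : Int), (0 : Int)) hg]
  cases L with
  | nil => exact absurd rfl hne
  | cons x t =>
    have hx1 : 1 ≤ (u x).1 := hu x (List.mem_cons_self)
    simp only [List.foldl_cons]
    rw [pyMax2_zero (c1 + (u x).1, c2 + (u x).2) (by dsimp only; omega),
        pyMax2_zero (u x) (by omega)]
    exact foldl_pyMax2_offset u c1 c2 t (u x)

theorem A_char : ∀ (n : Nat) (bridges : List (Int × Int)), bridges.length = n →
    ∀ (cc : List (Int × Int)) (free : Int),
      maxBridgeConnections cc free bridges
        = ((cc.length : Int) + (bestExt free bridges).1,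
           calcVal cc + (bestExt free bridges).2) := by
  intro n
  induction n using Nat.strong_induction_on with
  | _ n ih =>
    intro bridges hlen cc free
    rw [A_unfold, bestExt_eq]
    by_cases h0 : (bridges.filter (fun x => x.1 == free || x.2 == free)).length = 0
    · rw [if_pos h0, List.length_eq_zero_iff.mp h0]
      simp
    · rw [if_neg h0]
      have hne : bridges.filter (fun x => x.1 == free || x.2 == free) ≠ [] := by
        intro h; rw [h] at h0; exact h0 rfl
      refine foldl_pyMax2_zero _ _
        (fun b => (1 + (bestExt (if b.1 = free then b.2 else b.1) (removeFirst bridges b)).1,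
          b.1 + b.2 + (bestExt (if b.1 = free then b.2 else b.1) (removeFirst bridges b)).2))
        (cc.length : Int) (calcVal cc) ?_ ?_ (by positivity) hne
      · intro acc x hx
        have hmem : x ∈ bridges := List.mem_of_mem_filter hx
        have hrec := ih (removeFirst bridges x).length
          (by rw [← hlen]; exact removeFirst_length_lt bridges x hmem)
          (removeFirst bridges x) rfl (cc ++ [x]) (if x.1 = free then x.2 else x.1)
        dsimp only
        rw [hrec, update_eq_pyMax2]
        congr 1
        rw [calcVal_append]
        simp only [List.length_append, List.length_cons, List.length_nil, Prod.mk.injEq]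
        refine ⟨?_, ?_⟩ <;> push_cast <;> ring
      · intro x hx
        dsimp only
        have := bestExt_fst_nonneg (if x.1 = free then x.2 else x.1) (removeFirst bridges x)
        omega

-- ===== VERDICT (by name: the statement is the Claim_ definition above) =====
theorem maxBridgeConnections_spec : Claim_equal_maxBridgeConnections := by
  intro cc free bridges _
  unfold Spec_maxBridgeConnections
  rw [A_char bridges.length bridges rfl cc free]
  unfold maxBridgeConnections_alt
  by_cases h : (bridges.any (fun bridge => bridge.1 == free || bridge.2 == free)) = false
  · rw [if_pos h]
    have hfit : bridges.filter (fun x => x.1 == free || x.2 == free) = [] := by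
      rw [List.filter_eq_nil_iff]
      exact List.any_eq_false.mp h
    have hb : bestExt free bridges = ((0 : Int), (0 : Int)) := by
      rw [bestExt_eq, hfit]
      rfl
    rw [hb, calcVal_eq_totalB]
    simp
  · rw [if_neg h, calcVal_eq_totalB]
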